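-- pv_equiv track=rewrite | github.com/pypi-data/pypi-mirror-360 | packages/pipulate/pipulate-1.0.8.tar.gz/pipulate-1.0.8/client/ariat/robots/analyze.py | validate_urls_against_rules
-- ===== SOURCE A (Python) =====
-- def validate_urls_against_rules(urls, rules):
--     """Validates URLs against robots.txt rules to ensure they would be allowed."""
--     allowed_urls = []
--     blocked_urls = []
--
--     # Extract all Allow and Disallow patterns
--     allow_patterns = []
--     disallow_patterns = []
--
--     for line in rules.split('\n'):
--         line = line.strip()
--         if line.startswith('Allow: '):
--             allow_patterns.append(line[7:])  # Remove 'Allow: ' prefix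
--         elif line.startswith('Disallow: '):
--             disallow_patterns.append(line[10:])  # Remove 'Disallow: ' prefix
--
--     for url in urls:
--         if '?' not in url:
--             allowed_urls.append(url)
--             continue
--
--         # Extract query string
--         query_string = url.split('?', 1)[1]
--         params = query_string.split('&')
--
--         # Check if URL has too many parameters
--         if len(params) > 10:
--             blocked_urls.append((url, "Too many parameters"))
--             continue
--
--         # Check each parameter against rules
--         is_allowed = True
--         blocking_reason = None
--
--         for param in params:
--             param = param.split('=')[0] + '='
--
--             # Check if parameter is explicitly allowed
--             param_allowed = False
--             for pattern in allow_patterns: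
--                 if pattern.endswith('=') and param == pattern:
--                     param_allowed = True
--                     break
--                 elif pattern.endswith('*') and param.startswith(pattern[:-1]):
--                     param_allowed = True
--                     break
--
--             # Check if parameter is explicitly blocked
--             param_blocked = False
--             for pattern in disallow_patterns:
--                 if pattern.endswith('=') and param == pattern:
--                     param_blocked = True
--                     blocking_reason = f"Parameter blocked: {param}"
--                     break
--                 elif pattern.endswith('*') and param.startswith(pattern[:-1]):
--                     param_blocked = True
--                     blocking_reason = f"Parameter blocked: {param}"
--                     break
--
--             if param_blocked:
--                 is_allowed = False
--                 break
--
--         if is_allowed: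
--             allowed_urls.append(url)
--         else:
--             blocked_urls.append((url, blocking_reason))
--
--     return allowed_urls, blocked_urls
-- ===== SOURCE B (Python) =====
-- def validate_urls_against_rules(urls, rules):
--     """Validates URLs against robots.txt rules to ensure they would be allowed."""
--     patterns = [line.strip()[10:] for line in rules.split('\n')
--                 if line.strip().startswith('Disallow: ')]
--
--     def norm(p):
--         return p.split('=')[0] + '='
--
--     # Stage 1: split every URL once; collect the distinct parameter names
--     # that will ever need classifying.
--     parsed = []
--     names = set()
--     for url in urls:
--         if '?' in url:
--             ps = [norm(p) for p in url.split('?', 1)[1].split('&')]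
--             parsed.append((url, ps))
--             if len(ps) <= 10:
--                 names.update(ps)
--         else:
--             parsed.append((url, None))
--
--     # Stage 2: classify each distinct parameter name ONCE against the patterns.
--     blocked = {q: any((pat.endswith('=') and q == pat) or
--                       (pat.endswith('*') and q.startswith(pat[:-1]))
--                       for pat in patterns)
--                for q in names}
--
--     # Stage 3: decide every URL by table lookup; partition at the end.
--     verdicts = []
--     for url, ps in parsed:
--         if ps is None:
--             verdicts.append((url, None))
--         elif len(ps) > 10:
--             verdicts.append((url, "Too many parameters"))
--         else:
--             bad = next((q for q in ps if blocked[q]), None)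
--             verdicts.append((url, None if bad is None else f"Parameter blocked: {bad}"))
--     return ([u for u, r in verdicts if r is None],
--             [(u, r) for u, r in verdicts if r is not None])
-- ===== Notes on version B (the rewrite author's own statement) =====
-- stated objective: alternative
-- what changed: B is staged instead of A's nested per-URL/per-parameter rescans: it builds the Disallow list by one comprehension, splits each URL once, memoizes the classification of each DISTINCT parameter name in a dict built in one pass, decides every URL by table lookup, and partitions the verdict list at the end (A's dead Allow loop is dropped).
import Mathlib
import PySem

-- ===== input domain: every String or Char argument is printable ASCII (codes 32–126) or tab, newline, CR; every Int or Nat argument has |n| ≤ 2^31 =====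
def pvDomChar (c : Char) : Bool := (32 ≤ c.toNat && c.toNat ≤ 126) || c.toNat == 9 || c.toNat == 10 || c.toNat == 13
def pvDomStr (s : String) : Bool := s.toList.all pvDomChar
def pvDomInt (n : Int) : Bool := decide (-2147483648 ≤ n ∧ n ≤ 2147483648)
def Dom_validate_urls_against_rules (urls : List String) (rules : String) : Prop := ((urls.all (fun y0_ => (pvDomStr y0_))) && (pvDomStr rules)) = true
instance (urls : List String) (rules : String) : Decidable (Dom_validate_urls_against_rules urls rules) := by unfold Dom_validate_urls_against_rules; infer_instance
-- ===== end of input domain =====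

-- B replaces A's per-URL re-scan of the pattern lists by a staged algorithm: split every URL
-- once, classify each DISTINCT parameter name once into a memo dict, decide URLs by lookup,
-- partition the verdicts at the end; the return value is unchanged (objective: alternative).

-- shared transliterations of the identical Python expressions
-- "url.split('?', 1)[1].split('&')"  ('?' ∈ url, so piece [1] exists)
def pvParamsOf (url : String) : List String :=
  (PySem.Str.split? (((PySem.Str.splitMax? url "?" 1).getD []).getD 1 "") "&").getD []
-- "p.split('=')[0] + '='"  (split? with nonempty sep is some, and its head exists)
def pvNorm (p : String) : String := ((PySem.Str.split? p "=").getD []).headD "" ++ "="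

-- ===== PORT A =====
-- inner 'for pattern in allow_patterns' loop (its result 'param_allowed' is never read by A)
def pvAllowScanA (param : String) : List String → Bool
  | [] => false
  | pat :: rest =>
    if PySem.Str.endswith pat "=" && param == pat then true
    else if PySem.Str.endswith pat "*" && PySem.Str.startswith param (PySem.Str.slice pat none (some (-1))) then true
    else pvAllowScanA param rest

-- inner 'for pattern in disallow_patterns' loop; state = (param_blocked, blocking_reason)
def pvDisScanA (param : String) : List String → Bool × Option String → Bool × Option String
  | [], st => st
  | pat :: rest, st =>
    if PySem.Str.endswith pat "=" && param == pat then (true, some ("Parameter blocked: " ++ param))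
    else if PySem.Str.endswith pat "*" && PySem.Str.startswith param (PySem.Str.slice pat none (some (-1))) then
      (true, some ("Parameter blocked: " ++ param))
    else pvDisScanA param rest st

-- 'for param in params' loop; state = blocking_reason; result = (is_allowed, blocking_reason)
def pvParamLoopA (allow dis : List String) : List String → Option String → Bool × Option String
  | [], reason => (true, reason)
  | p :: rest, reason =>
    let param := pvNorm p
    let _param_allowed := pvAllowScanA param allow
    let st := pvDisScanA param dis (false, reason)
    if st.1 then (false, st.2) else pvParamLoopA allow dis rest st.2

-- "for line in rules.split('\n')" loop; acc = (allow_patterns, disallow_patterns)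
def pvParseA : List String → List String × List String → List String × List String
  | [], acc => acc
  | line :: rest, acc =>
    let s := PySem.Str.strip line
    if PySem.Str.startswith s "Allow: " then
      pvParseA rest (acc.1 ++ [PySem.Str.slice s (some 7) none], acc.2)
    else if PySem.Str.startswith s "Disallow: " then
      pvParseA rest (acc.1, acc.2 ++ [PySem.Str.slice s (some 10) none])
    else pvParseA rest acc

-- 'for url in urls' loop; acc = (allowed_urls, blocked_urls)
def pvUrlLoopA (allow dis : List String) :
    List String → List String × List (String × String) → List String × List (String × String)
  | [], acc => acc
  | url :: rest, acc =>
    if !(PySem.Str.isIn "?" url) then pvUrlLoopA allow dis rest (acc.1 ++ [url], acc.2)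
    else
      let params := pvParamsOf url
      if params.length > 10 then pvUrlLoopA allow dis rest (acc.1, acc.2 ++ [(url, "Too many parameters")])
      else
        let st := pvParamLoopA allow dis params none
        if st.1 then pvUrlLoopA allow dis rest (acc.1 ++ [url], acc.2)
        else pvUrlLoopA allow dis rest (acc.1, acc.2 ++ [(url, st.2.getD "")])

def validate_urls_against_rules (urls : List String) (rules : String) :
    List String × (List (String × String)) :=
  let pats := pvParseA ((PySem.Str.split? rules "\n").getD []) ([], [])
  pvUrlLoopA pats.1 pats.2 urls ([], [])

-- ===== PORT B =====
-- Source B's pattern comprehension over the rules lines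
def pvPatternsB (lines : List String) : List String :=
  lines.filterMap (fun line =>
    if PySem.Str.startswith (PySem.Str.strip line) "Disallow: " then
      some (PySem.Str.slice (PySem.Str.strip line) (some 10) none)
    else none)

-- the "any(... for pat in patterns)" inside Source B's dict comprehension
def pvMatchB (patterns : List String) (q : String) : Bool :=
  patterns.any (fun pat =>
    (PySem.Str.endswith pat "=" && q == pat) ||
    (PySem.Str.endswith pat "*" && PySem.Str.startswith q (PySem.Str.slice pat none (some (-1)))))

-- stage 1: split every URL once; collect the distinct names of URLs with ≤ 10 params
def pvStage1B : List String → List (String × Option (List String)) × PySem.Set String →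
    List (String × Option (List String)) × PySem.Set String
  | [], acc => acc
  | url :: rest, (parsed, names) =>
    if PySem.Str.isIn "?" url then
      let ps := (pvParamsOf url).map pvNorm
      pvStage1B rest (parsed ++ [(url, some ps)],
        if ps.length ≤ 10 then PySem.Set.update names ps else names)
    else pvStage1B rest (parsed ++ [(url, none)], names)

-- stage 2: the memo dict {q: any(...) for q in names} (looked up only; order-independent)
def pvTableB (patterns : List String) (names : PySem.Set String) : PySem.Dict String Bool :=
  names.foldl (fun d q => d.insert q (pvMatchB patterns q)) PySem.Dict.empty

-- stage 3: 'for url, ps in parsed' loop; 'blocked[q]' ported as getD (q is always a key)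
def pvStage3B (table : PySem.Dict String Bool) :
    List (String × Option (List String)) → List (String × Option String)
  | [] => []
  | (url, pso) :: rest =>
    (url,
      match pso with
      | none => none
      | some ps =>
        if ps.length > 10 then some "Too many parameters"
        else
          match ps.find? (fun q => table.getD q false) with
          | none => none
          | some q => some ("Parameter blocked: " ++ q)) :: pvStage3B table rest

def validate_urls_against_rules_alt (urls : List String) (rules : String) :
    List String × (List (String × String)) :=
  let patterns := pvPatternsB ((PySem.Str.split? rules "\n").getD [])
  let st := pvStage1B urls ([], PySem.Set.empty)
  let verdicts := pvStage3B (pvTableB patterns st.2) st.1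
  ((verdicts.filter (fun ur => ur.2.isNone)).map (fun ur => ur.1),
   verdicts.filterMap (fun ur => ur.2.map (fun r => (ur.1, r))))

-- ===== PRECONDITION & SPEC =====
def Spec_validate_urls_against_rules (urls : List String) (rules : String) (out : List String × (List (String × String))) : Prop := out = validate_urls_against_rules_alt urls rules
instance (urls : List String) (rules : String) (out : List String × (List (String × String))) : Decidable (Spec_validate_urls_against_rules urls rules out) := by unfold Spec_validate_urls_against_rules; infer_instance

-- ===== CLAIM (what is proved, stated in full; the proofs are below) =====
def Claim_equal_validate_urls_against_rules : Prop := ∀ (urls : List String) (rules : String), Dom_validate_urls_against_rules urls rules → Spec_validate_urls_against_rules urls rules (validate_urls_against_rules urls rules)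

-- ===== LEMMAS AND PROOFS =====

-- the per-URL verdict both algorithms implement: none = allowed, some reason = blocked
def pvVerdict (pats : List String) (url : String) : Option String :=
  if PySem.Str.isIn "?" url then
    if (pvParamsOf url).length > 10 then some "Too many parameters"
    else
      match ((pvParamsOf url).map pvNorm).find? (pvMatchB pats) with
      | none => none
      | some q => some ("Parameter blocked: " ++ q)
  else none

-- a line cannot start with both "Allow: " and "Disallow: "
theorem pv_not_both (s : String) (h : PySem.Str.startswith s "Allow: " = true) :
    PySem.Str.startswith s "Disallow: " = false := by
  by_contra hc
  rw [Bool.not_eq_false] at hc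
  simp only [PySem.Str.startswith_eq] at h hc
  rw [PySem.Chars.startswith_iff] at h hc
  obtain ⟨t1, e1⟩ := h
  obtain ⟨t2, e2⟩ := hc
  rw [← e1] at e2
  simp at e2

-- A's disallow-pattern list is B's comprehension
theorem pv_parse_snd (lines : List String) (al dl : List String) :
    (pvParseA lines (al, dl)).2 = dl ++ pvPatternsB lines := by
  induction lines generalizing al dl with
  | nil => simp [pvParseA, pvPatternsB]
  | cons line rest ih =>
    by_cases hA : PySem.Str.startswith (PySem.Str.strip line) "Allow: " = true
    · have hnd : ¬ PySem.Str.startswith (PySem.Str.strip line) "Disallow: " = true := by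
        rw [pv_not_both _ hA]; exact Bool.false_ne_true
      rw [show pvParseA (line :: rest) (al, dl)
            = pvParseA rest (al ++ [PySem.Str.slice (PySem.Str.strip line) (some 7) none], dl)
          from by simp only [pvParseA]; rw [if_pos hA]]
      rw [show pvPatternsB (line :: rest) = pvPatternsB rest
          from by simp only [pvPatternsB, List.filterMap_cons]; rw [if_neg hnd]]
      exact ih _ dl
    · by_cases hD : PySem.Str.startswith (PySem.Str.strip line) "Disallow: " = true
      · rw [show pvParseA (line :: rest) (al, dl)
              = pvParseA rest (al, dl ++ [PySem.Str.slice (PySem.Str.strip line) (some 10) none])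
            from by simp only [pvParseA]; rw [if_neg hA, if_pos hD]]
        rw [show pvPatternsB (line :: rest)
              = PySem.Str.slice (PySem.Str.strip line) (some 10) none :: pvPatternsB rest
            from by simp only [pvPatternsB, List.filterMap_cons]; rw [if_pos hD]]
        rw [ih]
        simp
      · rw [show pvParseA (line :: rest) (al, dl) = pvParseA rest (al, dl)
            from by simp only [pvParseA]; rw [if_neg hA, if_neg hD]]
        rw [show pvPatternsB (line :: rest) = pvPatternsB rest
            from by simp only [pvPatternsB, List.filterMap_cons]; rw [if_neg hD]]
        exact ih al dl

-- A's inner disallow scan computes the any-disjunction pvMatchB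
theorem pv_scan_eq (dl : List String) (param : String) (reason : Option String) :
    pvDisScanA param dl (false, reason) =
      (if pvMatchB dl param then (true, some ("Parameter blocked: " ++ param))
       else (false, reason)) := by
  induction dl with
  | nil => rfl
  | cons pat rest ih =>
    unfold pvMatchB at ih ⊢
    simp only [pvDisScanA, List.any_cons]
    by_cases h1 : (PySem.Str.endswith pat "=" && param == pat) = true
    · simp only [h1]
      rfl
    · rw [Bool.not_eq_true] at h1
      by_cases h2 : (PySem.Str.endswith pat "*" &&
          PySem.Str.startswith param (PySem.Str.slice pat none (some (-1)))) = true
      · simp only [h1, h2]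
        rfl
      · rw [Bool.not_eq_true] at h2
        simp only [h1, h2, Bool.false_eq_true, if_false, Bool.false_or]
        exact ih

-- A's parameter loop finds the first normalized parameter matched by a disallow pattern
theorem pv_param_loop_eq (allow dl : List String) (params : List String) (reason : Option String) :
    pvParamLoopA allow dl params reason =
      (match (params.map pvNorm).find? (pvMatchB dl) with
       | none => (true, reason)
       | some q => (false, some ("Parameter blocked: " ++ q))) := by
  induction params generalizing reason with
  | nil => rfl
  | cons p rest ih =>
    simp only [pvParamLoopA, List.map_cons, List.find?_cons]
    rw [pv_scan_eq]
    by_cases hm : pvMatchB dl (pvNorm p) = true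
    · simp [hm]
    · rw [Bool.not_eq_true] at hm
      simp only [hm, Bool.false_eq_true, if_false]
      exact ih reason

-- A's URL loop appends exactly the filter/filterMap of the per-URL verdict
theorem pv_url_loop_eq (allow dl : List String) (urls : List String)
    (acc : List String × List (String × String)) :
    pvUrlLoopA allow dl urls acc =
      (acc.1 ++ urls.filter (fun u => (pvVerdict dl u).isNone),
       acc.2 ++ urls.filterMap (fun u => (pvVerdict dl u).map (fun r => (u, r)))) := by
  induction urls generalizing acc with
  | nil => simp [pvUrlLoopA]
  | cons url rest ih =>
    simp only [pvUrlLoopA, List.filter_cons, List.filterMap_cons]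
    by_cases hq : PySem.Str.isIn "?" url = true
    · simp only [hq, Bool.not_true, Bool.false_eq_true, if_false]
      by_cases hl : (pvParamsOf url).length > 10
      · have hv : pvVerdict dl url = some "Too many parameters" := by
          unfold pvVerdict; rw [if_pos hq, if_pos hl]
        rw [if_pos hl, ih]
        simp [hv]
      · rw [if_neg hl]
        rw [pv_param_loop_eq allow dl _ none]
        cases hfb : ((pvParamsOf url).map pvNorm).find? (pvMatchB dl) with
        | none =>
          have hv : pvVerdict dl url = none := by
            unfold pvVerdict; rw [if_pos hq, if_neg hl, hfb]
          simp only [ih]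
          simp [hv]
        | some q =>
          have hv : pvVerdict dl url = some ("Parameter blocked: " ++ q) := by
            unfold pvVerdict; rw [if_pos hq, if_neg hl, hfb]
          simp only [ih]
          simp [hv]
    · have hv : pvVerdict dl url = none := by
        unfold pvVerdict; rw [if_neg hq]
      rw [Bool.not_eq_true] at hq
      simp only [hq, Bool.not_false, if_true, ih]
      simp [hv]

-- lookup in a dict built by inserting f q at key q, over any key list
theorem pv_getD_foldl_insert_fn (l : List String) (f : String → Bool)
    (d : PySem.Dict String Bool) (q : String) :
    (l.foldl (fun d x => d.insert x (f x)) d).getD q false =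
      (if q ∈ l then f q else d.getD q false) := by
  induction l generalizing d with
  | nil => simp
  | cons x xs ih =>
    simp only [List.foldl_cons, ih, List.mem_cons]
    by_cases hx : q ∈ xs
    · simp [hx]
    · by_cases he : q = x
      · simp [he]
      · simp [hx, he, PySem.Dict.getD_insert]

-- stage 1, first projection: the parsed list
theorem pv_stage1_fst (urls : List String)
    (acc : List (String × Option (List String)) × PySem.Set String) :
    (pvStage1B urls acc).1 = acc.1 ++ urls.map (fun u =>
      (u, if PySem.Str.isIn "?" u then some ((pvParamsOf u).map pvNorm) else none)) := by
  induction urls generalizing acc with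
  | nil => simp [pvStage1B]
  | cons url rest ih =>
    obtain ⟨parsed, names⟩ := acc
    simp only [pvStage1B, List.map_cons]
    by_cases hq : PySem.Str.isIn "?" url = true
    · simp only [hq, if_true, ih]
      simp
    · rw [Bool.not_eq_true] at hq
      simp only [hq, Bool.false_eq_true, if_false, ih]
      simp

-- stage 1, second projection: every name of a qualifying URL ends up in the set
theorem pv_stage1_names (urls : List String)
    (acc : List (String × Option (List String)) × PySem.Set String)
    (u : String) (hu : u ∈ urls) (hq : PySem.Str.isIn "?" u = true)
    (hl : ¬ ((pvParamsOf u).map pvNorm).length > 10)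
    (q : String) (hqm : q ∈ (pvParamsOf u).map pvNorm) :
    q ∈ (pvStage1B urls acc).2 := by
  -- monotonicity + insertion, in one induction
  induction urls generalizing acc with
  | nil => cases hu
  | cons url rest ih =>
    obtain ⟨parsed, names⟩ := acc
    have hmono : ∀ (acc' : List (String × Option (List String)) × PySem.Set String),
        q ∈ acc'.2 → q ∈ (pvStage1B rest acc').2 := by
      intro acc' hmem
      clear ih hu
      induction rest generalizing acc' with
      | nil => exact hmem
      | cons r rs ihr =>
        obtain ⟨p', n'⟩ := acc'
        simp only [pvStage1B]
        by_cases hr : PySem.Str.isIn "?" r = true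
        · simp only [hr, if_true]
          apply ihr
          by_cases hlen : ((pvParamsOf r).map pvNorm).length ≤ 10
          · simp only [hlen, if_true]
            exact (PySem.Set.mem_update _ _ _).mpr (Or.inl hmem)
          · simp only [hlen, if_false]
            exact hmem
        · rw [Bool.not_eq_true] at hr
          simp only [hr, Bool.false_eq_true, if_false]
          exact ihr _ hmem
    rcases List.mem_cons.mp hu with heq | htail
    · subst heq
      simp only [pvStage1B, hq, if_true]
      apply hmono
      have hlen : ((pvParamsOf u).map pvNorm).length ≤ 10 := by omega
      simp only [hlen, if_true]
      exact (PySem.Set.mem_update _ _ _).mpr (Or.inr hqm)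
    · simp only [pvStage1B]
      by_cases hr : PySem.Str.isIn "?" url = true
      · simp only [hr, if_true]
        exact ih _ htail
      · rw [Bool.not_eq_true] at hr
        simp only [hr, Bool.false_eq_true, if_false]
        exact ih _ htail

-- find? respects pointwise-equal predicates on the list's members
theorem pv_find?_congr {α : Type} (l : List α) (p q : α → Bool)
    (h : ∀ x ∈ l, p x = q x) : l.find? p = l.find? q := by
  induction l with
  | nil => rfl
  | cons x xs ih =>
    simp only [List.find?_cons, h x (List.mem_cons_self)]
    cases hq : q x with
    | true => rfl
    | false => exact ih (fun y hy => h y (List.mem_cons_of_mem _ hy))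

-- stage 3 over the parsed list computes the per-URL verdict, given a table that agrees
-- with pvMatchB on every parameter name it is asked about
theorem pv_B_eval (pats : List String) (table : PySem.Dict String Bool) (urls : List String)
    (htab : ∀ u ∈ urls, PySem.Str.isIn "?" u = true → ¬ ((pvParamsOf u).length > 10) →
        ((pvParamsOf u).map pvNorm).find? (fun q => table.getD q false)
          = ((pvParamsOf u).map pvNorm).find? (pvMatchB pats)) :
    pvStage3B table (urls.map (fun u =>
        (u, if PySem.Str.isIn "?" u then some ((pvParamsOf u).map pvNorm) else none)))
      = urls.map (fun u => (u, pvVerdict pats u)) := by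
  induction urls with
  | nil => rfl
  | cons u rest ih =>
    simp only [List.map_cons, pvStage3B]
    refine congrArg₂ List.cons ?_ (ih (fun v hv => htab v (List.mem_cons_of_mem _ hv)))
    by_cases hq : PySem.Str.isIn "?" u = true
    · rw [if_pos hq]
      show (u, if ((pvParamsOf u).map pvNorm).length > 10 then some "Too many parameters"
        else
          match ((pvParamsOf u).map pvNorm).find? (fun q => table.getD q false) with
          | none => none
          | some q => some ("Parameter blocked: " ++ q)) = (u, pvVerdict pats u)
      unfold pvVerdict
      rw [if_pos hq]
      by_cases hl : (pvParamsOf u).length > 10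
      · have hl' : ((pvParamsOf u).map pvNorm).length > 10 := by simpa using hl
        rw [if_pos hl', if_pos hl]
      · have hl' : ¬ ((pvParamsOf u).map pvNorm).length > 10 := by simpa using hl
        rw [if_neg hl', if_neg hl, htab u List.mem_cons_self hq hl]
    · unfold pvVerdict
      rw [Bool.not_eq_true] at hq
      rw [hq]
      rfl

-- ===== VERDICT (by name: the statement is the Claim_ definition above) =====
theorem validate_urls_against_rules_spec : Claim_equal_validate_urls_against_rules := by
  intro urls rules _
  unfold Spec_validate_urls_against_rules
  simp only [validate_urls_against_rules, validate_urls_against_rules_alt]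
  rw [pv_url_loop_eq, pv_parse_snd, pv_stage1_fst]
  simp only [List.nil_append]
  have htab : ∀ u ∈ urls, PySem.Str.isIn "?" u = true → ¬ ((pvParamsOf u).length > 10) →
      ((pvParamsOf u).map pvNorm).find?
          (fun q => (pvTableB (pvPatternsB ((PySem.Str.split? rules "\n").getD []))
            (pvStage1B urls ([], PySem.Set.empty)).2).getD q false)
        = ((pvParamsOf u).map pvNorm).find?
            (pvMatchB (pvPatternsB ((PySem.Str.split? rules "\n").getD []))) := by
    intro u hu hq hl
    apply pv_find?_congr
    intro q hqm
    have hl' : ¬ ((pvParamsOf u).map pvNorm).length > 10 := by simpa using hl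
    have hmem : q ∈ (pvStage1B urls ([], PySem.Set.empty)).2 :=
      pv_stage1_names urls ([], PySem.Set.empty) u hu hq hl' q hqm
    unfold pvTableB
    rw [pv_getD_foldl_insert_fn, if_pos hmem]
  rw [pv_B_eval _ _ _ htab]
  rw [List.filter_map, List.map_map, List.filterMap_map]
  simp [Function.comp_def]
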